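-- pv_equiv track=rewrite | github.com/parkchanbin54/boj | 프로그래머스/lv2/131127. 할인 행사/할인 행사.py | solution
-- ===== SOURCE A (Python) =====
-- def solution(want, number, discount):
--     answer = 0
--
--
--     for i in range(len(discount)-9):
--         tmp = discount[i:i+10]
--         tmp_dict = {}
--         flag = True
--
--         for w in want:
--             tmp_dict[w] = 0
--
--         for t in tmp:
--             if t in tmp_dict:
--                 tmp_dict[t] += 1
--
--         for k in range(len(number)):
--             if number[k] > tmp_dict[want[k]]:
--                 flag = False
--                 break
--
--         if flag:
--             answer += 1
--
--     return answer
-- ===== SOURCE B (Python) =====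
-- def solution(want, number, discount):
--     n = len(discount)
--     if n < 10:
--         return 0
--     pairs = list(zip(want, number))
--     pref = {}
--     for w, _ in pairs:
--         if w not in pref:
--             p = [0]
--             c = 0
--             for d in discount:
--                 if d == w:
--                     c += 1
--                 p.append(c)
--             pref[w] = p
--     arrs = [(pref[w], c) for w, c in pairs]
--     answer = 0
--     for i in range(n - 9):
--         if all(p[i + 10] - p[i] >= c for p, c in arrs):
--             answer += 1
--     return answer
-- ===== Notes on version B (the rewrite author's own statement) =====
-- stated objective: alternative
-- what changed: Per-window dict rebuild and recount is replaced by prefix-count arrays built once per distinct wanted item, so each window is checked by O(#pairs) prefix-sum differences instead of rebuilding and recounting a 10-element window dict.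
-- outside the precondition, e.g. on solution(['a'], [5, 1], ['b', 'b', 'b', 'b', 'b', 'b', 'b', 'b', 'b', 'b']): A returns 0, B returns 0
import Mathlib
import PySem

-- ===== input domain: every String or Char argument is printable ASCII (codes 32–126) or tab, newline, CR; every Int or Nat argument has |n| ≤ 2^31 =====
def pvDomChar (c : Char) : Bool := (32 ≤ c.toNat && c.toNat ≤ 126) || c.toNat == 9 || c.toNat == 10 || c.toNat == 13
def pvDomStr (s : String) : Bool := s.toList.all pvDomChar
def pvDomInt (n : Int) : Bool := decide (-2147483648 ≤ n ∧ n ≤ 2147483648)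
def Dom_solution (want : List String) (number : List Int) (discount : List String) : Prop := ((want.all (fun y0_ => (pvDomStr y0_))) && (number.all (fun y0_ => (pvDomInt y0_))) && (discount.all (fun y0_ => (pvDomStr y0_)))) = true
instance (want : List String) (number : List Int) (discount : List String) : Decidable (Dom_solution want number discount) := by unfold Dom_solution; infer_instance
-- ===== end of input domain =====

-- B replaces A's per-window dict rebuild + recount by prefix-count arrays built once; equivalence is about the return value (neither mutates its arguments).

-- ===== PORT A =====
-- the k-loop with its break ('if number[k] > tmp_dict[want[k]]: flag = False; break')
def solutionCheck (want : List String) (number : List Int) (d : PySem.Dict String Int) : List Int → Bool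
  | [] => true
  | k :: ks =>
      if PySem.List.pyGetD number k 0 > d.getD (PySem.List.pyGetD want k "") 0 then false
      else solutionCheck want number d ks

def solution (want : List String) (number : List Int) (discount : List String) : Int :=
  (PySem.List.pyRange 0 ((discount.length : Int) - 9) 1).foldl (fun answer i =>
    let tmp := PySem.List.slice discount (some i) (some (i + 10))
    let d0 : PySem.Dict String Int := want.foldl (fun d w => d.insert w 0) PySem.Dict.empty
    let d1 := tmp.foldl (fun d t => if d.contains t then d.modify t 0 (· + 1) else d) d0
    let flag := solutionCheck want number d1 (PySem.List.pyRange 0 (number.length : Int) 1)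
    if flag then answer + 1 else answer) 0

-- ===== PORT B =====
-- the inner prefix-building loop of B: p = [0]; c = 0; for d in discount: c += (d == w); p.append(c)
def altPrefix (discount : List String) (w : String) : List Int :=
  (discount.foldl (fun (pc : List Int × Int) d =>
      let c := pc.2 + (if d == w then 1 else 0)
      (pc.1 ++ [c], c)) ([0], 0)).1

def solution_alt (want : List String) (number : List Int) (discount : List String) : Int :=
  let n : Int := discount.length
  if n < 10 then 0 else
    let pairs := want.zip number
    let pref : PySem.Dict String (List Int) := pairs.foldl (fun pref wc =>
        if pref.contains wc.1 then pref else pref.insert wc.1 (altPrefix discount wc.1)) PySem.Dict.empty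
    let arrs := pairs.map (fun wc => (pref.getD wc.1 [], wc.2))
    (PySem.List.pyRange 0 (n - 9) 1).foldl (fun answer i =>
      if arrs.all (fun pc =>
          PySem.List.pyGetD pc.1 (i + 10) 0 - PySem.List.pyGetD pc.1 i 0 ≥ pc.2)
      then answer + 1 else answer) 0

-- ===== PRECONDITION & SPEC =====
-- Pre_ excludes inputs with more quantity entries than wanted items while at least one 10-day
-- window exists: there A may raise IndexError on want[k]; on such inputs where A does return
-- (every window fails before the index overrun) it returns 0 and B returns 0 as well.
def Pre_solution (want : List String) (number : List Int) (discount : List String) : Prop :=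
  number.length ≤ want.length ∨ discount.length < 10

instance (want : List String) (number : List Int) (discount : List String) : Decidable (Pre_solution want number discount) := by unfold Pre_solution; infer_instance

def pvWitness_solution : List String × List Int × List String :=
  (["a"], [1], ["a", "b", "a", "a", "b", "a", "a", "a", "b", "a"])

def Spec_solution (want : List String) (number : List Int) (discount : List String) (out : Int) : Prop := out = solution_alt want number discount
instance (want : List String) (number : List Int) (discount : List String) (out : Int) : Decidable (Spec_solution want number discount out) := by unfold Spec_solution; infer_instance

-- ===== CLAIM (what is proved, stated in full; the proofs are below) =====
def Claim_equal_solution : Prop := ∀ (want : List String) (number : List Int) (discount : List String), Dom_solution want number discount → Pre_solution want number discount → Spec_solution want number discount (solution want number discount)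

-- ===== LEMMAS AND PROOFS =====

-- the initialisation loop 'for w in want: tmp_dict[w] = 0' keeps every lookup-with-default-0 at 0
theorem pvGetD_initFold (ws : List String) : ∀ (d : PySem.Dict String Int),
    (∀ v, d.getD v 0 = 0) → ∀ v, (ws.foldl (fun d w => d.insert w 0) d).getD v 0 = 0 := by
  induction ws with
  | nil => intro d h v; exact h v
  | cons w ws ih =>
      intro d h v
      refine ih _ (fun u => ?_) v
      rw [PySem.Dict.getD_insert]
      split_ifs with h' <;> [rfl; exact h u]

-- membership of the initialised dict's key set is membership of want
theorem pvContains_initFold (want : List String) (v : String) :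
    ((want.foldl (fun d w => d.insert w 0) (PySem.Dict.empty : PySem.Dict String Int)).contains v = true)
      ↔ v ∈ want := by
  rw [show (fun (d : PySem.Dict String Int) (w : String) => d.insert w 0)
        = (fun d w => d.insert w ((fun (_ : PySem.Dict String Int) (_ : String) => (0 : Int)) d w)) from rfl]
  rw [PySem.Dict.contains_iff_mem_keys, PySem.Dict.keys_foldl_insert]
  have : PySem.Set.update ((PySem.Dict.empty : PySem.Dict String Int).keys) want
       = PySem.Set.ofList want := by
    rw [PySem.Set.ofList_eq_foldl]; rfl
  rw [this, PySem.Set.mem_ofList]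

-- and it adds exactly the count of v in the traversed list to every key already present
theorem pvGetD_countFold (l : List String) : ∀ (d : PySem.Dict String Int) (v : String),
    (l.foldl (fun d t => if d.contains t then d.modify t 0 (· + 1) else d) d).getD v 0
      = d.getD v 0 + (if d.contains v then (l.count v : Int) else 0) := by
  induction l with
  | nil => intro d v; simp
  | cons t l ih =>
      intro d v
      simp only [List.foldl_cons]
      by_cases ht : d.contains t
      · rw [if_pos ht, ih]
        have hc : (d.modify t 0 (· + 1)).contains v = d.contains v := by
          rw [PySem.Dict.contains_modify]
          by_cases hv : v = t
          · subst hv; simp [ht]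
          · simp [hv]
        rw [hc, PySem.Dict.getD_modify]
        by_cases hv : v = t
        · subst hv
          rw [if_pos rfl, if_pos ht, if_pos ht, List.count_cons]
          simp
          omega
        · rw [if_neg hv, List.count_cons]
          have : (t == v) = false := by simp [Ne.symm hv]  -- placeholder check
          rw [this]
          simp
      · rw [if_neg ht, ih, List.count_cons]
        by_cases hv : v = t
        · subst hv
          rw [if_neg ht, if_neg ht]
        · have : (t == v) = false := by simp [Ne.symm hv]
          rw [this]
          simp

-- lookup in the per-window dict of A = occurrence count in the window, for any wanted item
theorem pvCnt_eq (want tmp : List String) (w : String) (hw : w ∈ want) :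
    ((tmp.foldl (fun d t => if d.contains t then d.modify t 0 (· + 1) else d)
        (want.foldl (fun d w => d.insert w 0) (PySem.Dict.empty : PySem.Dict String Int))).getD w 0)
      = (tmp.count w : Int) := by
  rw [pvGetD_countFold]
  rw [pvGetD_initFold want _ (fun v => PySem.Dict.getD_empty v 0) w]
  rw [if_pos ((pvContains_initFold want w).mpr hw)]
  omega

-- the k-loop with break is an 'all' over the index range
theorem pvSolutionCheck_eq_all (want : List String) (number : List Int) (d : PySem.Dict String Int) :
    ∀ ks : List Int, solutionCheck want number d ks
      = ks.all (fun k => decide (PySem.List.pyGetD number k 0 ≤ d.getD (PySem.List.pyGetD want k "") 0)) := by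
  intro ks
  induction ks with
  | nil => rfl
  | cons k ks ih =>
      rw [solutionCheck, List.all_cons, ih]
      by_cases h : PySem.List.pyGetD number k 0 > d.getD (PySem.List.pyGetD want k "") 0
      · rw [if_pos h]
        simp [not_le.mpr h]
      · rw [if_neg h]
        simp [not_lt.mp h]

-- B's inner prefix loop, fully characterised
theorem pvAltPrefix_fold (w : String) (ds : List String) : ∀ (p : List Int) (c : Int),
    (ds.foldl (fun (pc : List Int × Int) d =>
        let c := pc.2 + (if d == w then 1 else 0)
        (pc.1 ++ [c], c)) (p, c)).1
      = p ++ (List.range ds.length).map (fun j => c + ((ds.take (j+1)).count w : Int)) := by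
  induction ds with
  | nil => intro p c; simp
  | cons d ds ih =>
      intro p c
      simp only [List.foldl_cons]
      rw [ih]
      rw [List.length_cons, List.range_succ_eq_map]
      simp only [List.map_cons, List.map_map]
      rw [List.append_assoc]
      congr 1
      simp only [List.singleton_append]
      congr 1
      · by_cases hd : d = w <;> simp [hd]
      · apply List.map_congr_left
        intro j _
        simp only [Function.comp_apply, Nat.succ_eq_add_one]
        rw [List.take_succ_cons, List.count_cons]
        by_cases hd : d = w <;> simp [hd] <;> omega

theorem pvAltPrefix_eq (discount : List String) (w : String) :
    altPrefix discount w
      = (List.range (discount.length + 1)).map (fun j => ((discount.take j).count w : Int)) := by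
  unfold altPrefix
  rw [pvAltPrefix_fold]
  rw [List.range_succ_eq_map]
  simp only [List.map_cons, List.map_map]
  rw [List.take_zero, List.count_nil]
  simp only [Nat.cast_zero, List.singleton_append]  -- [0] ++ … = 0 :: …
  congr 1
  apply List.map_congr_left
  intro j _
  simp [Nat.succ_eq_add_one]

-- B's prefix dict maps every key that occurs among the pairs to its prefix array
theorem pvPrefFold (discount : List String) (ps : List (String × Int)) :
    ∀ (d : PySem.Dict String (List Int)),
    (∀ v, d.contains v = true → d.getD v [] = altPrefix discount v) →
    ∀ v, (v ∈ ps.map Prod.fst ∨ d.contains v = true) →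
    (ps.foldl (fun pref wc =>
        if pref.contains wc.1 then pref else pref.insert wc.1 (altPrefix discount wc.1)) d).getD v []
      = altPrefix discount v := by
  induction ps with
  | nil =>
      intro d h v hv
      rcases hv with hv | hv
      · simp at hv
      · exact h v hv
  | cons wc ps ih =>
      intro d h v hv
      simp only [List.foldl_cons]
      by_cases hc : d.contains wc.1
      · rw [if_pos hc]
        apply ih d h
        rcases hv with hv | hv
        · rw [List.map_cons] at hv
          rcases List.mem_cons.mp hv with h1 | h1
          · right; rw [h1]; exact hc
          · left; exact h1
        · right; exact hv
      · rw [if_neg hc]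
        refine ih _ (fun u hu => ?_) v ?_
        · rw [PySem.Dict.contains_insert] at hu
          rw [PySem.Dict.getD_insert]
          by_cases h1 : u = wc.1
          · rw [if_pos h1, h1]
          · rw [if_neg h1]
            apply h
            simpa [h1] using hu
        · rcases hv with hv | hv
          · rw [List.map_cons] at hv
            rcases List.mem_cons.mp hv with h1 | h1
            · right; rw [PySem.Dict.contains_insert]; simp [h1]
            · left; exact h1
          · right; rw [PySem.Dict.contains_insert]; simp [hv]

-- prefix-count difference = occurrence count in the 10-day slice
theorem pvPrefDiff (discount : List String) (w : String) (i : Int)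
    (h0 : 0 ≤ i) (h1 : i + 10 ≤ (discount.length : Int)) :
    PySem.List.pyGetD (altPrefix discount w) (i + 10) 0
      - PySem.List.pyGetD (altPrefix discount w) i 0
      = ((PySem.List.slice discount (some i) (some (i + 10))).count w : Int) := by
  rw [pvAltPrefix_eq]
  rw [PySem.List.pyGetD_of_nonneg _ _ (by omega), PySem.List.pyGetD_of_nonneg _ _ h0]
  rw [PySem.List.getD_map_range _ _ _ _ (by omega), PySem.List.getD_map_range _ _ _ _ (by omega)]
  rw [PySem.List.slice_toNat discount h0 (by omega)]
  set k := (i + 10).toNat - i.toNat with hk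
  have hsplit : (i + 10).toNat = i.toNat + k := by omega
  rw [hsplit, List.take_add, List.count_append]
  push_cast
  ring

-- per-window equality: A's dict check = B's prefix-difference check
theorem pvWindow (want : List String) (number : List Int) (discount : List String)
    (hlen : number.length ≤ want.length) (i : Int) (hi0 : 0 ≤ i)
    (hi1 : i + 10 ≤ (discount.length : Int)) :
    solutionCheck want number
        ((PySem.List.slice discount (some i) (some (i + 10))).foldl
          (fun d t => if d.contains t then d.modify t 0 (· + 1) else d)
          (want.foldl (fun d w => d.insert w 0) (PySem.Dict.empty : PySem.Dict String Int)))
        (PySem.List.pyRange 0 ((number.length : Int)) 1)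
      = ((want.zip number).map (fun wc =>
            ((((want.zip number).foldl (fun pref wc =>
              if pref.contains wc.1 then pref else pref.insert wc.1 (altPrefix discount wc.1))
              (PySem.Dict.empty : PySem.Dict String (List Int))).getD wc.1 []), wc.2))).all (fun pc =>
          decide (PySem.List.pyGetD pc.1 (i + 10) 0 - PySem.List.pyGetD pc.1 i 0 ≥ pc.2)) := by
  have hpref : ∀ v, v ∈ (want.zip number).map Prod.fst →
      ((want.zip number).foldl (fun pref wc =>
          if pref.contains wc.1 then pref else pref.insert wc.1 (altPrefix discount wc.1))
          (PySem.Dict.empty : PySem.Dict String (List Int))).getD v [] = altPrefix discount v := by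
    intro v hv
    exact pvPrefFold discount (want.zip number) PySem.Dict.empty
      (fun u hu => by simp [PySem.Dict.contains_empty] at hu) v (Or.inl hv)
  rw [pvSolutionCheck_eq_all, PySem.List.pyRange_zero, List.all_map, List.all_map, Bool.eq_iff_iff]
  simp only [List.all_eq_true]
  have hQ : ∀ k : Nat, k < number.length →
      ((decide (PySem.List.pyGetD number ((k : Nat) : Int) 0 ≤
          ((PySem.List.slice discount (some i) (some (i + 10))).foldl
            (fun d t => if d.contains t then d.modify t 0 (· + 1) else d)
            (want.foldl (fun d w => d.insert w 0) PySem.Dict.empty)).getD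
          (PySem.List.pyGetD want ((k : Nat) : Int) "") 0)) = true
        ↔ number.getD k 0 ≤
            (((PySem.List.slice discount (some i) (some (i + 10))).count (want.getD k "") : Nat) : Int)) := by
    intro k hk
    simp only [PySem.List.pyGetD_natCast, decide_eq_true_iff]
    rw [pvCnt_eq want _ (want.getD k "")
      (by rw [List.getD_eq_getElem want "" (by omega)]; exact List.getElem_mem _)]
  constructor
  · intro h wc hwc
    obtain ⟨k, hk, hget⟩ := List.mem_iff_getElem.mp hwc
    have hkn : k < number.length := by
      rw [List.length_zip] at hk; omega
    have h1 := h k (List.mem_range.mpr (by omega))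
    rw [Function.comp_apply] at h1
    rw [hQ k hkn] at h1
    rw [Function.comp_apply, decide_eq_true_iff]
    rw [hpref wc.1 (List.mem_map.mpr ⟨wc, hwc, rfl⟩)]
    rw [pvPrefDiff discount wc.1 i hi0 hi1]
    have hwc1 : wc.1 = want.getD k "" := by
      rw [← hget, List.getElem_zip, List.getD_eq_getElem want "" (by omega)]
    have hwc2 : wc.2 = number.getD k 0 := by
      rw [← hget, List.getElem_zip, List.getD_eq_getElem number 0 hkn]
    rw [hwc1, hwc2]
    exact h1
  · intro h k hk
    have hkn : k < number.length := by
      have := List.mem_range.mp hk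
      omega
    rw [Function.comp_apply, hQ k hkn]
    have hwc : (want[k]'(by omega), number[k]'hkn) ∈ want.zip number := by
      have hk' : k < (want.zip number).length := by rw [List.length_zip]; omega
      have := List.getElem_mem (l := want.zip number) (n := k) hk'
      rwa [List.getElem_zip] at this
    have h1 := h _ hwc
    rw [Function.comp_apply, decide_eq_true_iff] at h1
    rw [hpref _ (List.mem_map.mpr ⟨_, hwc, rfl⟩)] at h1
    rw [pvPrefDiff discount _ i hi0 hi1] at h1
    rw [List.getD_eq_getElem want "" (by omega), List.getD_eq_getElem number 0 hkn]
    exact h1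

-- ===== VERDICT (by name: the statement is the Claim_ definition above) =====
theorem solution_spec : Claim_equal_solution := by
  intro want number discount _ hpre
  unfold Spec_solution solution solution_alt
  simp only []
  by_cases hn : ((discount.length : Int)) < 10
  · rw [if_pos hn, PySem.List.pyRange_one_eq_nil (show (discount.length : Int) - 9 ≤ 0 by omega)]
    rfl
  · rw [if_neg hn]
    have hlen : number.length ≤ want.length := by
      rcases hpre with h | h
      · exact h
      · exfalso; exact hn (by exact_mod_cast h)
    apply PySem.List.foldl_congr_mem'
    intro i hi acc
    obtain ⟨hi0, hi1⟩ := PySem.List.mem_pyRange_one.mp hi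
    rw [pvWindow want number discount hlen i hi0 (by omega)]
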